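-- pv_equiv track=rewrite | github.com/zakarich/Passive_Voice_Extraction_with_NLP_and_NER_using_Stanford | PassiveVoice.py | isPassive
-- ===== SOURCE A (Python) =====
-- def isPassive(tokens,words):
--     beforms = ['am', 'is', 'are', 'been', 'was', 'were', 'be', 'being']
--     # all forms of "be"
--     aux = ['do', 'did', 'does', 'have', 'has', 'had']
--     # NLTK tags "do" and "have" asverbs, which can be misleading in the following section.
--     tags = [i[1] for i in tokens]
--     if tags.count('VBN') == 0:
--         # no paste participle, no passive voice.
--         return False
--     elif tags.count('VBN') == 1 and 'been' in words:
--         # one VBN (Paste Participle) as "been", still no passive voice.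
--         return False
--     else:
--         pos = [i for i in range(len(tags)) if tags[i] == 'VBN' and words[i] != 'been']
--         # gather all the VBN (verb past participle) that are not "been".
--         for end in pos:
--             chunk = tags[:end]
--             start = 0
--             for i in range(len(chunk), 0, -1):
--                 last = chunk.pop()
--                 if last == 'NN' or last == 'PRP':
--                     start = i
--                     # get the chunk between VBN(Paste Particple) and the previous NN (Noun, singular or mass) or PRP (Personal Pronoun) (which in most cases are subjects)
--                     break
--             sentchunk = words[start:end]
--             tagschunk = tags[start:end]
--             verbspos = [i for i in range(len(tagschunk)) if tagschunk[i].startswith('V')]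
--             # get all the verbs in between
--             if verbspos != []:
--                 # if there are no verbs in between, it's not passive
--                 for i in verbspos:
--                     if sentchunk[i].lower() not in beforms and sentchunk[i].lower() not in aux:
--                         # check if they are all forms of "be" or auxiliaries such as "do" or "have".
--                         break
--                 else:
--                     return True
--     return False
-- ===== SOURCE B (Python) =====
-- def isPassive(tokens, words):
--     BEFORMS = {'am', 'is', 'are', 'been', 'was', 'were', 'be', 'being'}
--     AUX = {'do', 'did', 'does', 'have', 'has', 'had'}
--     tags = [t for _, t in tokens]
--     if tags.count('VBN') == 1 and 'been' in words:
--         return False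
--     # one left-to-right pass: keep the last subject / verb / non-aux-verb index
--     last_subj = last_verb = last_bad = -1
--     for i, (tag, word) in enumerate(zip(tags, words)):
--         if tag == 'VBN' and word != 'been':
--             if last_verb > last_subj and last_bad <= last_subj:
--                 return True
--         if tag == 'NN' or tag == 'PRP':
--             last_subj = i
--         if tag.startswith('V'):
--             last_verb = i
--             if word.lower() not in BEFORMS and word.lower() not in AUX:
--                 last_bad = i
--     return False
-- ===== Notes on version B (the rewrite author's own statement) =====
-- stated objective: alternative
-- what changed: A rescans the tag prefix backwards and rebuilds the verb window for every VBN; B makes a single left-to-right pass keeping the last subject, last verb and last non-auxiliary-verb indices and decides each VBN with a constant-size state comparison.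
import Mathlib
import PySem

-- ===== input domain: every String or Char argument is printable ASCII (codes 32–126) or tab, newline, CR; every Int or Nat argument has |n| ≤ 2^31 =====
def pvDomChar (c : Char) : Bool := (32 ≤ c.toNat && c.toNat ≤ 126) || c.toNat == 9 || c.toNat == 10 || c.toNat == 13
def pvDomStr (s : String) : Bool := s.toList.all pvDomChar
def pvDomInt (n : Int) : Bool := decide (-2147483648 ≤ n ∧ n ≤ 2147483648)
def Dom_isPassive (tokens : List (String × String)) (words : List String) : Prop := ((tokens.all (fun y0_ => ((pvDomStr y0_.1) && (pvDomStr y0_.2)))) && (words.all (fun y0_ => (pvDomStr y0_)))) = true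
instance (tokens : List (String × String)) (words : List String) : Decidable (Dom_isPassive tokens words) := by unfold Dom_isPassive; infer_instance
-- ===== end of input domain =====

-- B replaces A's per-VBN backward rescan of the tag prefix by a single left-to-right
-- pass keeping the last subject / verb / non-auxiliary-verb indices (alternative algorithm).

-- ===== PORT A =====
-- all forms of "be" / auxiliaries (the two constant lists of the Python source)
def pvBeL : List String := ["am", "is", "are", "been", "was", "were", "be", "being"]
def pvAuxL : List String := ["do", "did", "does", "have", "has", "had"]
def pvOk (w : String) : Bool := pvBeL.contains (PySem.Str.lower w) || pvAuxL.contains (PySem.Str.lower w)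

-- A's inner pop-loop: scan tags[:end] from the right for the last 'NN'/'PRP',
-- return its 1-based position (Python variable `start`), 0 if none.
def pvStartOf (chunk : List String) : Nat :=
  if h : chunk = [] then 0
  else
    let last := chunk.getLast h
    if last = "NN" ∨ last = "PRP" then chunk.length
    else pvStartOf chunk.dropLast
termination_by chunk.length
decreasing_by
  have : chunk.length ≠ 0 := fun hl => h (List.eq_nil_of_length_eq_zero hl)
  simp [List.length_dropLast]; omega

-- the body of A's `for end in pos` loop (returns True for this `end` iff the
-- for/else falls through, i.e. there are verbs in between and all are be/aux)
def pvEndCheck (tags : List String) (words : List String) (e : Nat) : Bool :=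
  let chunk := tags.take e
  let start := pvStartOf chunk
  -- Python slices words[start:end], tags[start:end] with 0 ≤ start ≤ end: drop/take is exact
  let sentchunk := (words.drop start).take (e - start)
  let tagschunk := (tags.drop start).take (e - start)
  let verbspos := (List.range tagschunk.length).filter (fun i => (tagschunk.getD i "").startsWith "V")
  !verbspos.isEmpty && verbspos.all (fun i => pvOk (sentchunk.getD i ""))

def isPassive (tokens : List (String × String)) (words : List String) : Bool :=
  let tags := tokens.map (fun i => i.2)
  if tags.count "VBN" = 0 then false
  else if tags.count "VBN" = 1 && words.contains "been" then false
  else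
    -- words[i]: Python raises IndexError when a VBN index reaches beyond words; Pre_ excludes exactly those inputs, getD is exact on Pre_
    let pos := (List.range tags.length).filter (fun i => tags.getD i "" == "VBN" && words.getD i "" != "been")
    pos.any (pvEndCheck tags words)

-- ===== PORT B =====
-- one pass over enumerate(zip(tags, words)) with the three running indices (-1 = none yet)
def pvAltLoop : List (String × String) → Nat → Int → Int → Int → Bool
  | [], _, _, _, _ => false
  | (tag, word) :: rest, i, lastSubj, lastVerb, lastBad =>
    if tag = "VBN" ∧ word ≠ "been" ∧ lastSubj < lastVerb ∧ lastBad ≤ lastSubj then true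
    else
      let lastSubj' := if tag = "NN" ∨ tag = "PRP" then (i : Int) else lastSubj
      let isV := tag.startsWith "V"
      let lastVerb' := if isV then (i : Int) else lastVerb
      let lastBad' := if isV && !pvOk word then (i : Int) else lastBad
      pvAltLoop rest (i + 1) lastSubj' lastVerb' lastBad'

def isPassive_alt (tokens : List (String × String)) (words : List String) : Bool :=
  let tags := tokens.map (fun t => t.2)
  if tags.count "VBN" = 1 && words.contains "been" then false
  else pvAltLoop (tags.zip words) 0 (-1) (-1) (-1)

-- ===== PRECONDITION & SPEC =====
-- Pre_ excludes exactly the inputs on which A raises IndexError: a 'VBN' tag at an index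
-- beyond the end of words (unless the early 'one VBN and been' branch returns first).
def Pre_isPassive (tokens : List (String × String)) (words : List String) : Prop :=
  ((tokens.map (fun t => t.2)).drop words.length).count "VBN" = 0 ∨
  ((tokens.map (fun t => t.2)).count "VBN" = 1 ∧ words.contains "been" = true)
instance (tokens : List (String × String)) (words : List String) : Decidable (Pre_isPassive tokens words) := by unfold Pre_isPassive; infer_instance

def pvWitness_isPassive : (List (String × String)) × List String :=
  ([("he", "PRP"), ("was", "VBD"), ("bitten", "VBN")], ["he", "was", "bitten"])

def Spec_isPassive (tokens : List (String × String)) (words : List String) (out : Bool) : Prop := out = isPassive_alt tokens words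
instance (tokens : List (String × String)) (words : List String) (out : Bool) : Decidable (Spec_isPassive tokens words out) := by unfold Spec_isPassive; infer_instance

-- ===== CLAIM (what is proved, stated in full; the proofs are below) =====
def Claim_equal_isPassive : Prop := ∀ (tokens : List (String × String)) (words : List String), Dom_isPassive tokens words → Pre_isPassive tokens words → Spec_isPassive tokens words (isPassive tokens words)

-- ===== LEMMAS AND PROOFS =====

-- spec-level predicates over full lists (getD-based, like both ports)
def pvSubjB (T : List String) (j : Nat) : Bool := (T.getD j "" = "NN") || (T.getD j "" = "PRP")
def pvVerbB (T : List String) (j : Nat) : Bool := (T.getD j "").startsWith "V"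
def pvBadB (T W : List String) (j : Nat) : Bool := pvVerbB T j && !pvOk (W.getD j "")

-- last index < e satisfying p, as an Int (-1 if none)
def pvLastIdx (p : Nat → Bool) : Nat → Int
  | 0 => -1
  | e + 1 => if p e then (e : Int) else pvLastIdx p e

theorem pvLastIdx_neg1_le (p : Nat → Bool) (e : Nat) : -1 ≤ pvLastIdx p e := by
  induction e with
  | zero => simp [pvLastIdx]
  | succ e ih =>
    simp only [pvLastIdx]
    split
    · omega
    · exact ih

theorem pvLastIdx_le_of (p : Nat → Bool) (e j : Nat) (hj : j < e) (hp : p j = true) :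
    (j : Int) ≤ pvLastIdx p e := by
  induction e with
  | zero => omega
  | succ e ih =>
    simp only [pvLastIdx]
    rcases Nat.lt_succ_iff_lt_or_eq.mp hj with h | h
    · split
      · have := ih h; omega
      · exact ih h
    · subst h; simp [hp]

theorem pvLastIdx_cases (p : Nat → Bool) (e : Nat) :
    pvLastIdx p e = -1 ∨ ∃ j : Nat, j < e ∧ p j = true ∧ pvLastIdx p e = (j : Int) := by
  induction e with
  | zero => left; rfl
  | succ e ih =>
    simp only [pvLastIdx]
    split
    · right; exact ⟨e, by omega, by assumption, rfl⟩
    · rcases ih with h | ⟨j, hj, hp, hv⟩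
      · left; exact h
      · right; exact ⟨j, by omega, hp, hv⟩

theorem pvKey_exists (s p : Nat → Bool) (e : Nat) :
    pvLastIdx s e < pvLastIdx p e ↔ ∃ j : Nat, pvLastIdx s e < (j : Int) ∧ j < e ∧ p j = true := by
  constructor
  · intro h
    rcases pvLastIdx_cases p e with hc | ⟨j, hj, hp, hv⟩
    · have := pvLastIdx_neg1_le s e; omega
    · exact ⟨j, by omega, hj, hp⟩
  · rintro ⟨j, h1, h2, h3⟩
    have := pvLastIdx_le_of p e j h2 h3
    omega

theorem pvKey_forall (s b : Nat → Bool) (e : Nat) :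
    pvLastIdx b e ≤ pvLastIdx s e ↔ ∀ j : Nat, pvLastIdx s e < (j : Int) → j < e → b j = false := by
  constructor
  · intro h j h1 h2
    by_contra hb
    have hb' : b j = true := by simpa using hb
    have := pvLastIdx_le_of b e j h2 hb'
    omega
  · intro h
    rcases pvLastIdx_cases b e with hc | ⟨j, hj, hp, hv⟩
    · have := pvLastIdx_neg1_le s e; omega
    · by_contra hlt
      have : b j = false := h j (by omega) hj
      simp [this] at hp

theorem pvStartOf_concat (l : List String) (x : String) :
    pvStartOf (l ++ [x]) = if x = "NN" ∨ x = "PRP" then l.length + 1 else pvStartOf l := by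
  rw [pvStartOf]
  simp

theorem pvStartOf_le (l : List String) : pvStartOf l ≤ l.length := by
  induction l using List.reverseRecOn with
  | nil => simp [pvStartOf]
  | append_singleton l x ih =>
    rw [pvStartOf_concat]
    split
    · simp
    · simp; omega

theorem pvStartOf_take (T : List String) (e : Nat) (he : e ≤ T.length) :
    (pvStartOf (T.take e) : Int) = pvLastIdx (pvSubjB T) e + 1 := by
  induction e with
  | zero => simp [pvStartOf, pvLastIdx]
  | succ e ih =>
    have he' : e < T.length := by omega
    have hg : T[e]? = some (T.getD e "") := by
      simp [List.getD, List.getElem?_eq_getElem he']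
    rw [List.take_add_one, hg]
    simp only [Option.toList_some]
    rw [pvStartOf_concat]
    have hlen : (T.take e).length = e := by rw [List.length_take]; omega
    by_cases h : T.getD e "" = "NN" ∨ T.getD e "" = "PRP"
    · have hb : pvSubjB T e = true := by
        unfold pvSubjB
        simp only [Bool.or_eq_true, decide_eq_true_eq]
        exact h
      rw [if_pos h, hlen]
      simp only [pvLastIdx, hb, if_true]
      push_cast
      ring
    · have hb : pvSubjB T e = false := by
        unfold pvSubjB
        simp only [Bool.or_eq_false_iff, decide_eq_false_iff_not]
        exact not_or.mp h
      rw [if_neg h]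
      simp only [pvLastIdx, hb, Bool.false_eq_true, if_false]
      exact ih (by omega)

theorem pvGetD_shift (l : List String) (s t i : Nat) (h : i < t) :
    ((l.drop s).take t).getD i "" = l.getD (s + i) "" := by
  simp [List.getD, h, List.getElem?_drop]



theorem pvFilterNonempty {α : Type} (l : List α) (p : α → Bool) :
    (!(l.filter p).isEmpty) = true ↔ ∃ x ∈ l, p x = true := by
  simp [List.filter_eq_nil_iff]

theorem pvFilterAll {α : Type} (l : List α) (p q : α → Bool) :
    (l.filter p).all q = true ↔ ∀ x ∈ l, p x = true → q x = true := by
  simp only [List.all_eq_true, List.mem_filter, and_imp]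

theorem pvBad_false_iff (T W : List String) (j : Nat) :
    pvBadB T W j = false ↔ (pvVerbB T j = true → pvOk (W.getD j "") = true) := by
  simp [pvBadB]

theorem pvEndAux (T W : List String) (e S : Nat) (hSle : S ≤ e) (he : e ≤ T.length) :
    (!((List.range ((T.drop S).take (e - S)).length).filter
        (fun i => (((T.drop S).take (e - S)).getD i "").startsWith "V")).isEmpty
      && ((List.range ((T.drop S).take (e - S)).length).filter
            (fun i => (((T.drop S).take (e - S)).getD i "").startsWith "V")).all
           (fun i => pvOk (((W.drop S).take (e - S)).getD i ""))) = true ↔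
    ((∃ j : Nat, S ≤ j ∧ j < e ∧ pvVerbB T j = true) ∧
     ∀ j : Nat, S ≤ j → j < e → pvVerbB T j = true → pvOk (W.getD j "") = true) := by
  have hlen : ((T.drop S).take (e - S)).length = e - S := by
    simp only [List.length_take, List.length_drop]; omega
  have htag : ∀ i, i < e - S → ((T.drop S).take (e - S)).getD i "" = T.getD (S + i) "" :=
    fun i hi => pvGetD_shift T S (e - S) i hi
  have hsent : ∀ i, i < e - S → ((W.drop S).take (e - S)).getD i "" = W.getD (S + i) "" :=
    fun i hi => pvGetD_shift W S (e - S) i hi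
  rw [Bool.and_eq_true, pvFilterNonempty, pvFilterAll, hlen]
  constructor
  · rintro ⟨⟨i, hi, hp⟩, hall⟩
    rw [List.mem_range] at hi
    refine ⟨⟨S + i, Nat.le_add_right _ _, by omega, ?_⟩, ?_⟩
    · simp only [pvVerbB]; rw [← htag i hi]; exact hp
    · intro j hSj hje hv
      have hij : j - S < e - S := by omega
      have heq : S + (j - S) = j := by omega
      have h1 : (((T.drop S).take (e - S)).getD (j - S) "").startsWith "V" = true := by
        rw [htag _ hij, heq]
        simpa [pvVerbB] using hv
      have := hall (j - S) (List.mem_range.mpr hij) h1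
      rwa [hsent _ hij, heq] at this
  · rintro ⟨⟨j, hSj, hje, hv⟩, hall⟩
    refine ⟨⟨j - S, List.mem_range.mpr (by omega), ?_⟩, ?_⟩
    · rw [htag _ (by omega), show S + (j - S) = j by omega]
      simpa [pvVerbB] using hv
    · intro i hi hp
      rw [List.mem_range] at hi
      have hv' : pvVerbB T (S + i) = true := by
        simp only [pvVerbB]; rw [← htag i hi]; exact hp
      have := hall (S + i) (Nat.le_add_right _ _) (by omega) hv'
      rwa [hsent i hi]

theorem pvEndCheck_iff (T W : List String) (e : Nat) (he : e ≤ T.length) :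
    pvEndCheck T W e = true ↔
      ((∃ j : Nat, pvStartOf (T.take e) ≤ j ∧ j < e ∧ pvVerbB T j = true) ∧
       ∀ j : Nat, pvStartOf (T.take e) ≤ j → j < e → pvVerbB T j = true →
         pvOk (W.getD j "") = true) := by
  have hSle : pvStartOf (T.take e) ≤ e := by
    have h1 := pvStartOf_le (T.take e)
    rw [List.length_take] at h1; omega
  unfold pvEndCheck
  exact pvEndAux T W e (pvStartOf (T.take e)) hSle he

theorem pvAltLoop_iff (T W : List String) (i : Nat) :
    pvAltLoop ((T.zip W).drop i) i
        (pvLastIdx (pvSubjB T) i) (pvLastIdx (pvVerbB T) i) (pvLastIdx (pvBadB T W) i) = true ↔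
      ∃ e : Nat, i ≤ e ∧ e < min T.length W.length ∧
        T.getD e "" = "VBN" ∧ W.getD e "" ≠ "been" ∧
        pvLastIdx (pvSubjB T) e < pvLastIdx (pvVerbB T) e ∧
        pvLastIdx (pvBadB T W) e ≤ pvLastIdx (pvSubjB T) e := by
  have main : ∀ d i, (T.zip W).length - i = d →
      (pvAltLoop ((T.zip W).drop i) i
          (pvLastIdx (pvSubjB T) i) (pvLastIdx (pvVerbB T) i) (pvLastIdx (pvBadB T W) i) = true ↔
        ∃ e : Nat, i ≤ e ∧ e < min T.length W.length ∧
          T.getD e "" = "VBN" ∧ W.getD e "" ≠ "been" ∧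
          pvLastIdx (pvSubjB T) e < pvLastIdx (pvVerbB T) e ∧
          pvLastIdx (pvBadB T W) e ≤ pvLastIdx (pvSubjB T) e) := by
    intro d
    induction d with
    | zero =>
      intro i hd
      have hik : (T.zip W).length ≤ i := by omega
      rw [List.drop_eq_nil_of_le hik]
      rw [List.length_zip] at hik
      simp only [pvAltLoop, Bool.false_eq_true, false_iff]
      rintro ⟨e, h1, h2, -⟩
      omega
    | succ d ih =>
      intro i hd
      have hik : i < (T.zip W).length := by omega
      have hiT : i < T.length := by rw [List.length_zip] at hik; omega
      have hiW : i < W.length := by rw [List.length_zip] at hik; omega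
      rw [List.drop_eq_getElem_cons hik]
      have hzg : (T.zip W)[i] = (T.getD i "", W.getD i "") := by
        rw [List.getElem_zip]
        rw [List.getD_eq_getElem T "" hiT, List.getD_eq_getElem W "" hiW]
      rw [hzg]
      simp only [pvAltLoop]
      by_cases hc : T.getD i "" = "VBN" ∧ W.getD i "" ≠ "been" ∧
          pvLastIdx (pvSubjB T) i < pvLastIdx (pvVerbB T) i ∧
          pvLastIdx (pvBadB T W) i ≤ pvLastIdx (pvSubjB T) i
      · rw [if_pos hc]
        simp only [true_iff]
        exact ⟨i, le_refl i, by omega, hc.1, hc.2.1, hc.2.2.1, hc.2.2.2⟩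
      · rw [if_neg hc]
        have hS : (if T.getD i "" = "NN" ∨ T.getD i "" = "PRP"
              then (i : Int) else pvLastIdx (pvSubjB T) i) = pvLastIdx (pvSubjB T) (i + 1) := by
          show _ = if pvSubjB T i then _ else _
          by_cases h : T.getD i "" = "NN" ∨ T.getD i "" = "PRP"
          · have hb : pvSubjB T i = true := by
              unfold pvSubjB
              simp only [Bool.or_eq_true, decide_eq_true_eq]
              exact h
            rw [if_pos h, hb, if_pos rfl]
          · have hb : pvSubjB T i = false := by
              unfold pvSubjB
              simp only [Bool.or_eq_false_iff, decide_eq_false_iff_not]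
              exact not_or.mp h
            rw [if_neg h, hb]
            simp
        have hV : (if (T.getD i "").startsWith "V"
              then (i : Int) else pvLastIdx (pvVerbB T) i) = pvLastIdx (pvVerbB T) (i + 1) := by
          show _ = if pvVerbB T i then _ else _
          rfl
        have hB : (if (T.getD i "").startsWith "V" && !pvOk (W.getD i "")
              then (i : Int) else pvLastIdx (pvBadB T W) i) = pvLastIdx (pvBadB T W) (i + 1) := by
          show _ = if pvBadB T W i then _ else _
          rfl
        rw [hS, hV, hB, ih (i + 1) (by omega)]
        constructor
        · rintro ⟨e, he1, rest⟩
          exact ⟨e, by omega, rest⟩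
        · rintro ⟨e, he1, he2, h3, h4, h5, h6⟩
          rcases Nat.eq_or_lt_of_le he1 with h | h
          · exact absurd ⟨h ▸ h3, h ▸ h4, h ▸ h5, h ▸ h6⟩ hc
          · exact ⟨e, by omega, he2, h3, h4, h5, h6⟩
  exact main ((T.zip W).length - i) i rfl

theorem pvPosAny_iff (T W : List String) :
    ((List.range T.length).filter
        (fun i => T.getD i "" == "VBN" && W.getD i "" != "been")).any (pvEndCheck T W) = true ↔
      ∃ e : Nat, e < T.length ∧ T.getD e "" = "VBN" ∧ W.getD e "" ≠ "been" ∧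
        pvEndCheck T W e = true := by
  simp only [List.any_eq_true, List.mem_filter, List.mem_range, Bool.and_eq_true,
    beq_iff_eq, bne_iff_ne, ne_eq]
  constructor
  · rintro ⟨e, ⟨h1, h2, h3⟩, h4⟩
    exact ⟨e, h1, h2, h3, h4⟩
  · rintro ⟨e, h1, h2, h3, h4⟩
    exact ⟨e, ⟨h1, h2, h3⟩, h4⟩

-- the per-end conditions of the two ports agree
theorem pvCond_iff (T W : List String) (e : Nat) (he : e ≤ T.length) :
    pvEndCheck T W e = true ↔
      (pvLastIdx (pvSubjB T) e < pvLastIdx (pvVerbB T) e ∧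
       pvLastIdx (pvBadB T W) e ≤ pvLastIdx (pvSubjB T) e) := by
  rw [pvEndCheck_iff T W e he]
  have hs := pvStartOf_take T e he
  constructor
  · rintro ⟨⟨j, h1, h2, h3⟩, hall⟩
    constructor
    · exact (pvKey_exists (pvSubjB T) (pvVerbB T) e).mpr ⟨j, by omega, h2, h3⟩
    · rw [pvKey_forall (pvSubjB T) (pvBadB T W) e]
      intro j hj1 hj2
      rw [pvBad_false_iff]
      exact hall j (by omega) hj2
  · rintro ⟨h1, h2⟩
    rcases (pvKey_exists (pvSubjB T) (pvVerbB T) e).mp h1 with ⟨j, hj1, hj2, hj3⟩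
    refine ⟨⟨j, by omega, hj2, hj3⟩, ?_⟩
    intro j hj1' hj2' hv
    have := (pvKey_forall (pvSubjB T) (pvBadB T W) e).mp h2 j (by omega) hj2'
    rw [pvBad_false_iff] at this
    exact this hv

-- ===== VERDICT (by name: the statement is the Claim_ definition above) =====
theorem pvCountPos (T : List String) (e : Nat) (he : e < T.length)
    (hv : T.getD e "" = "VBN") : T.count "VBN" ≠ 0 := by
  have hm : "VBN" ∈ T := by
    rw [← hv, List.getD_eq_getElem T "" he]
    exact List.getElem_mem he
  simpa [List.count_eq_zero] using hm

theorem isPassive_spec : Claim_equal_isPassive := by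
  intro tokens words _ hPre
  unfold Spec_isPassive isPassive isPassive_alt
  set T := tokens.map (fun i => i.2) with hT
  by_cases hg : (T.count "VBN" = 1 && words.contains "been") = true
  · have h1 : T.count "VBN" = 1 := by
      rcases Bool.and_eq_true_iff.mp hg with ⟨h, -⟩
      exact of_decide_eq_true h
    have h0 : ¬ T.count "VBN" = 0 := by omega
    rw [if_neg h0, if_pos hg, if_pos hg]
  · rw [if_neg hg]
    have hPre1 : (T.drop words.length).count "VBN" = 0 := by
      rcases hPre with h | h
      · exact h
      · exact absurd (Bool.and_eq_true_iff.mpr ⟨decide_eq_true h.1, h.2⟩) hg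
    have hH : ∀ e, e < T.length → T.getD e "" = "VBN" → e < words.length := by
      intro e he hv
      by_contra hcon
      have hme : e - words.length < (T.drop words.length).length := by
        rw [List.length_drop]; omega
      have hm : "VBN" ∈ T.drop words.length := by
        have hg2 : (T.drop words.length)[e - words.length] = T[e]'he := by
          rw [List.getElem_drop]
          congr 1
          omega
        rw [← hv, List.getD_eq_getElem T "" he, ← hg2]
        exact List.getElem_mem hme
      rw [List.count_eq_zero] at hPre1
      exact hPre1 hm
    have hloop := pvAltLoop_iff T words 0
    simp only [List.drop_zero, pvLastIdx] at hloop
    by_cases h0 : T.count "VBN" = 0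
    · rw [if_pos h0]
      symm
      rw [← Bool.not_eq_true, hloop]
      rintro ⟨e, -, he2, hv, -⟩
      exact pvCountPos T e (by omega) hv h0
    · rw [if_neg h0, if_neg hg]
      have beq : ∀ a b : Bool, a = b ↔ (a = true ↔ b = true) := by decide
      rw [beq, hloop]
      simp only [pvPosAny_iff]
      constructor
      · rintro ⟨e, he1, hv, hb, hchk⟩
        refine ⟨e, Nat.zero_le e, ?_, hv, hb, ?_⟩
        · have := hH e he1 hv; omega
        · exact (pvCond_iff T words e (le_of_lt he1)).mp hchk
      · rintro ⟨e, -, he2, hv, hb, hc⟩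
        have he1 : e < T.length := by omega
        exact ⟨e, he1, hv, hb, (pvCond_iff T words e (le_of_lt he1)).mpr hc⟩
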